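-- pv_equiv track=rewrite | github.com/ibm-z-oss-oda/aniso8601 | aniso8601/builders/python.py | _distribute_microseconds
-- ===== SOURCE A (Python) =====
-- def _distribute_microseconds(todistribute, recipients, reductions):
--     #Given a number of microseconds as int, a tuple of ints length n
--     #to distribute to, and a tuple of ints length n to divide todistribute
--     #by (from largest to smallest), returns a tuple of length n + 1, with
--     #todistribute divided across recipients using the reductions, with
--     #the final remainder returned as the final tuple member
--     results = []
--
--     remainder = todistribute
--
--     for index, reduction in enumerate(reductions):
--         additional, remainder = divmod(remainder, reduction)
--
--         results.append(recipients[index] + additional)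
--
--     #Always return the remaining microseconds
--     results.append(remainder)
--
--     return tuple(results)
-- ===== SOURCE B (Python) =====
-- def _distribute_microseconds(todistribute, recipients, reductions):
--     # Pass 1: remainder chain: remainders[i] is what's left before reduction i.
--     remainders = [todistribute]
--     for reduction in reductions:
--         remainders.append(remainders[-1] % reduction)
--     # Pass 2: each recipient gains the quotient of its remainder by its reduction.
--     results = [recipient + remainder // reduction
--                for remainder, reduction, recipient in zip(remainders, reductions, recipients)]
--     results.append(remainders[-1])
--     return tuple(results)
-- ===== Notes on version B (the rewrite author's own statement) =====
-- stated objective: alternative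
-- what changed: Replaces A's single divmod loop that interleaves quotient and remainder updates with a two-pass structure: first build the full remainder chain (successive % reductions), then zip it with reductions and recipients to add each quotient; the final remainder is the chain's last element.
import Mathlib
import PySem

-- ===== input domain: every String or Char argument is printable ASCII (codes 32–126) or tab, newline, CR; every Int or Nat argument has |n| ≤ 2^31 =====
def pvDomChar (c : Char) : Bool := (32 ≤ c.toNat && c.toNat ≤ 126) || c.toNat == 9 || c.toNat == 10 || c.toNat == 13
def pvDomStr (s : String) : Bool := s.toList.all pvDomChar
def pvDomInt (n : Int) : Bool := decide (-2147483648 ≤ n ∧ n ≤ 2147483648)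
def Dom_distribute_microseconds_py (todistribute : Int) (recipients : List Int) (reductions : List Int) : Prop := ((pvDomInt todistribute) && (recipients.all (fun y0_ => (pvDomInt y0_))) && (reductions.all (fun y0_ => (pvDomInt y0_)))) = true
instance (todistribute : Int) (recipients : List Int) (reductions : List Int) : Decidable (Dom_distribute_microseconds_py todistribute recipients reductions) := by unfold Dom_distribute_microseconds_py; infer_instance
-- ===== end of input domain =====

-- B replaces A's interleaved divmod loop by two passes: a remainder chain, then a zip adding quotients (objective: alternative decomposition; same O(n) cost).

-- ===== PORT A =====
def distribute_microseconds_py (todistribute : Int) (recipients : List Int) (reductions : List Int) : List Int :=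
  let st := (PySem.List.enumerate reductions 0).foldl
    (fun (st : List Int × Int) ir =>
      let additional := PySem.Int.floordiv st.2 ir.2
      let remainder := PySem.Int.mod st.2 ir.2
      (st.1 ++ [(PySem.List.pyGet? recipients ir.1).getD 0 + additional], remainder))
    ([], todistribute)
  st.1 ++ [st.2]

-- ===== PORT B =====
def distribute_microseconds_py_alt (todistribute : Int) (recipients : List Int) (reductions : List Int) : List Int :=
  let remainders := reductions.foldl
    (fun acc r => acc ++ [PySem.Int.mod ((PySem.List.pyGet? acc (-1)).getD 0) r])
    [todistribute]
  let results := (remainders.zip (reductions.zip recipients)).map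
    (fun p => p.2.2 + PySem.Int.floordiv p.1 p.2.1)
  results ++ [(PySem.List.pyGet? remainders (-1)).getD 0]

-- ===== PRECONDITION & SPEC =====
-- Pre_ excludes exactly where Python A raises: a zero reduction (ZeroDivisionError)
-- or more reductions than recipients (IndexError at recipients[index]).
def Pre_distribute_microseconds_py (todistribute : Int) (recipients : List Int) (reductions : List Int) : Prop :=
  (∀ r ∈ reductions, r ≠ 0) ∧ reductions.length ≤ recipients.length
instance (todistribute : Int) (recipients : List Int) (reductions : List Int) : Decidable (Pre_distribute_microseconds_py todistribute recipients reductions) := by unfold Pre_distribute_microseconds_py; infer_instance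

def pvWitness_distribute_microseconds_py : Int × List Int × List Int := (10, [1, 2], [7, 3])

def Spec_distribute_microseconds_py (todistribute : Int) (recipients : List Int) (reductions : List Int) (out : List Int) : Prop := out = distribute_microseconds_py_alt todistribute recipients reductions
instance (todistribute : Int) (recipients : List Int) (reductions : List Int) (out : List Int) : Decidable (Spec_distribute_microseconds_py todistribute recipients reductions out) := by unfold Spec_distribute_microseconds_py; infer_instance

-- ===== CLAIM (what is proved, stated in full; the proofs are below) =====
def Claim_equal_distribute_microseconds_py : Prop := ∀ (todistribute : Int) (recipients : List Int) (reductions : List Int), Dom_distribute_microseconds_py todistribute recipients reductions → Pre_distribute_microseconds_py todistribute recipients reductions → Spec_distribute_microseconds_py todistribute recipients reductions (distribute_microseconds_py todistribute recipients reductions)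

-- ===== LEMMAS AND PROOFS =====

-- Common reference: the list of per-index contributions, and the final remainder.
def pvChainList (t : Int) (rs : List Int) (recips : List Int) : List Int :=
  match rs with
  | [] => []
  | r :: rs' => (recips.headD 0 + PySem.Int.floordiv t r) :: pvChainList (PySem.Int.mod t r) rs' recips.tail

def pvChainRem (t : Int) (rs : List Int) : Int :=
  match rs with
  | [] => t
  | r :: rs' => pvChainRem (PySem.Int.mod t r) rs'

-- Remainder chain used by B.
def pvRems (t : Int) (rs : List Int) : List Int :=
  match rs with
  | [] => [t]
  | r :: rs' => t :: pvRems (PySem.Int.mod t r) rs'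

theorem pvRems_ne_nil (t : Int) (rs : List Int) : pvRems t rs ≠ [] := by
  cases rs <;> simp [pvRems]

theorem pvRems_getLast? (t : Int) (rs : List Int) :
    (pvRems t rs).getLast? = some (pvChainRem t rs) := by
  induction rs generalizing t with
  | nil => simp [pvRems, pvChainRem]
  | cons r rs ih =>
    simp [pvRems, pvChainRem, List.getLast?_cons, ih, pvRems_ne_nil]

-- A's loop computes pvChainList / pvChainRem.
theorem pvLoopA (recips : List Int) (rs : List Int) :
    ∀ (s : Nat) (acc : List Int) (t : Int), s + rs.length ≤ recips.length →
    (PySem.List.enumerate rs (s : Int)).foldl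
      (fun (st : List Int × Int) ir =>
        let additional := PySem.Int.floordiv st.2 ir.2
        let remainder := PySem.Int.mod st.2 ir.2
        (st.1 ++ [(PySem.List.pyGet? recips ir.1).getD 0 + additional], remainder))
      (acc, t)
    = (acc ++ pvChainList t rs (recips.drop s), pvChainRem t rs) := by
  induction rs with
  | nil => intro s acc t _; simp [PySem.List.enumerate_nil, pvChainList, pvChainRem]
  | cons r rs ih =>
    intro s acc t hlen
    rw [PySem.List.enumerate_cons]
    simp only [List.foldl_cons]
    have hs : s < recips.length := by simp at hlen; omega
    have hget : PySem.List.pyGet? recips (s : Int) = some recips[s] := by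
      rw [PySem.List.pyGet?_natCast]; exact List.getElem?_eq_getElem hs
    have hcast : ((s : Int) + 1) = ((s + 1 : Nat) : Int) := by push_cast; ring
    rw [hcast]
    rw [ih (s + 1) (acc ++ [(PySem.List.pyGet? recips (s : Int)).getD 0 + PySem.Int.floordiv t r])
        (PySem.Int.mod t r) (by simp at hlen ⊢; omega)]
    have hhead : (recips.drop s).headD 0 = recips[s] := by
      simp [List.headD_eq_head?_getD, List.head?_drop, List.getElem?_eq_getElem hs]
    simp [pvChainList, pvChainRem, hget, hhead, List.tail_drop, List.append_assoc,
      List.getElem?_eq_getElem hs]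

-- B's first pass builds pvRems.
theorem pvLoopB (rs : List Int) :
    ∀ (acc : List Int) (t : Int),
    rs.foldl (fun acc r => acc ++ [PySem.Int.mod ((PySem.List.pyGet? acc (-1)).getD 0) r])
      (acc ++ [t])
    = acc ++ pvRems t rs := by
  induction rs with
  | nil => intro acc t; simp [pvRems]
  | cons r rs ih =>
    intro acc t
    simp only [List.foldl_cons]
    rw [PySem.List.pyGet?_neg_one_append_singleton]
    simp only [Option.getD_some]
    have := ih (acc ++ [t]) (PySem.Int.mod t r)
    simp only [List.append_assoc] at this ⊢
    rw [this]
    simp [pvRems]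

-- B's second pass computes pvChainList.
theorem pvZipB (rs : List Int) :
    ∀ (t : Int) (recips : List Int), rs.length ≤ recips.length →
    ((pvRems t rs).zip (rs.zip recips)).map
      (fun p => p.2.2 + PySem.Int.floordiv p.1 p.2.1)
    = pvChainList t rs recips := by
  induction rs with
  | nil => intro t recips _; simp [pvRems, pvChainList]
  | cons r rs ih =>
    intro t recips hlen
    cases recips with
    | nil => simp at hlen
    | cons q qs =>
      simp only [pvRems, pvChainList, List.zip_cons_cons, List.map_cons]
      simp only [List.headD_cons, List.tail_cons]
      rw [ih (PySem.Int.mod t r) qs (by simpa using hlen)]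

-- ===== VERDICT (by name: the statement is the Claim_ definition above) =====
theorem distribute_microseconds_py_spec : Claim_equal_distribute_microseconds_py := by
  intro t recips rs _ hpre
  obtain ⟨-, hlen⟩ := hpre
  have hA := pvLoopA recips rs 0 [] t (by omega)
  rw [Nat.cast_zero, List.drop_zero, List.nil_append] at hA
  have hrems : rs.foldl (fun acc r => acc ++ [PySem.Int.mod ((PySem.List.pyGet? acc (-1)).getD 0) r]) [t]
      = pvRems t rs := by
    have := pvLoopB rs [] t
    simpa using this
  unfold Spec_distribute_microseconds_py distribute_microseconds_py distribute_microseconds_py_alt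
  simp only [hA, hrems]
  simp only [PySem.List.pyGet?_neg_one, pvRems_getLast?, Option.getD_some]
  rw [pvZipB rs t recips hlen]
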